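-- pv_equiv track=rewrite | github.com/gMock-28/SneakerParsers | lamoda.py | type_and_model_splitter
-- ===== SOURCE A (Python) =====
-- def type_and_model_splitter(type_model, i=0):
--     ord_of_char = ord(type_model[i])
--     if ord_of_char < 123 and ord_of_char != 32:
--         return [type_model[:i-1].strip(), type_model[i:].strip()]
--     else:
--         i += 1
--         if i != len(type_model):
--             return type_and_model_splitter(type_model, i)
--         else:
--             return [type_model[:i-1].strip(), type_model[i:].strip()]
-- ===== SOURCE B (Python) =====
-- def type_and_model_splitter(type_model, i=0):
--     j = i
--     while ord(type_model[j]) >= 123 or ord(type_model[j]) == 32: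
--         j += 1
--         if j == len(type_model):
--             break
--     return [type_model[:j-1].strip(), type_model[j:].strip()]
-- ===== Notes on version B (the rewrite author's own statement) =====
-- stated objective: idiomatic
-- what changed: Replaces A's tail recursion (one call frame per scanned character, slice-and-return duplicated in two branches) by an explicit while-loop that only advances the index, with the two strip-slices computed once after the loop.
import Mathlib
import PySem

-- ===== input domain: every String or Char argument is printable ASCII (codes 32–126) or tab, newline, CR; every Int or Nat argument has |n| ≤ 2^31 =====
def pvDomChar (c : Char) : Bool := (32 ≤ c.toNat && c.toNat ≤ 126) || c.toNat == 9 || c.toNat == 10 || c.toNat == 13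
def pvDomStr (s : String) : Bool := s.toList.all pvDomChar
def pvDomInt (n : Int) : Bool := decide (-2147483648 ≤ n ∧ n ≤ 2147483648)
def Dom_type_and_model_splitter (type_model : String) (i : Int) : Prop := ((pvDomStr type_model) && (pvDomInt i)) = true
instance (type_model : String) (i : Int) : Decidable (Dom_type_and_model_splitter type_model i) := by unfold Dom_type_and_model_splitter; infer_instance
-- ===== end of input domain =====

-- B replaces A's tail recursion by an explicit index-advancing loop with the two strip-slices computed once after it (idiomatic).


-- ===== PORT A =====
-- literal transliteration of A's recursion over the list of code points;
-- pyGet? = none is Python's IndexError ([] there, excluded by Pre_)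
def pvTmsA (s : List Char) (i : Int) : List String :=
  match h : PySem.List.pyGet? s i with
  | none => []
  | some c =>
    if (c.toNat : Int) < 123 ∧ (c.toNat : Int) ≠ 32 then
      [String.ofList (PySem.Chars.strip (PySem.List.slice s none (some (i - 1)))),
       String.ofList (PySem.Chars.strip (PySem.List.slice s (some i) none))]
    else if i + 1 ≠ (s.length : Int) then
      pvTmsA s (i + 1)
    else
      [String.ofList (PySem.Chars.strip (PySem.List.slice s none (some (i + 1 - 1)))),
       String.ofList (PySem.Chars.strip (PySem.List.slice s (some (i + 1)) none))]
termination_by ((s.length : Int) - i).toNat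
decreasing_by
  have : PySem.Raise.InRange s.length i := by
    by_contra hc
    rw [← PySem.List.pyGet?_eq_none_iff (xs := s) (i := i)] at hc
    simp [hc] at h
  unfold PySem.Raise.InRange at this
  omega

def type_and_model_splitter (type_model : String) (i : Int) : List String :=
  pvTmsA type_model.toList i

-- ===== PORT B =====
-- transliteration of Source B's while-loop: advance j past spaces / ord ≥ 123 chars, breaking at the end
-- (pyGet? = none is Python's IndexError in the first loop test; unreachable under Pre_)
def pvFindJ (s : List Char) (j : Int) : Int :=
  match h : PySem.List.pyGet? s j with
  | none => j
  | some c =>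
    if (c.toNat : Int) ≥ 123 ∨ (c.toNat : Int) = 32 then
      if j + 1 = (s.length : Int) then j + 1 else pvFindJ s (j + 1)
    else j
termination_by ((s.length : Int) - j).toNat
decreasing_by
  have : PySem.Raise.InRange s.length j := by
    by_contra hc
    rw [← PySem.List.pyGet?_eq_none_iff (xs := s) (i := j)] at hc
    simp [hc] at h
  unfold PySem.Raise.InRange at this
  omega

def type_and_model_splitter_alt (type_model : String) (i : Int) : List String :=
  let s := type_model.toList
  let j := pvFindJ s i
  [String.ofList (PySem.Chars.strip (PySem.List.slice s none (some (j - 1)))),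
   String.ofList (PySem.Chars.strip (PySem.List.slice s (some j) none))]

-- ===== PRECONDITION & SPEC =====
-- A raises IndexError exactly when the start index is out of range for the string
-- (in particular on the empty string); Pre_ admits every input where A returns.
def Pre_type_and_model_splitter (type_model : String) (i : Int) : Prop :=
  PySem.Raise.InRange type_model.toList.length i
instance (type_model : String) (i : Int) : Decidable (Pre_type_and_model_splitter type_model i) := by unfold Pre_type_and_model_splitter; infer_instance

def pvWitness_type_and_model_splitter : String × Int := ("a b", 0)

def Spec_type_and_model_splitter (type_model : String) (i : Int) (out : List String) : Prop := out = type_and_model_splitter_alt type_model i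
instance (type_model : String) (i : Int) (out : List String) : Decidable (Spec_type_and_model_splitter type_model i out) := by unfold Spec_type_and_model_splitter; infer_instance

-- ===== CLAIM (what is proved, stated in full; the proofs are below) =====
def Claim_equal_type_and_model_splitter : Prop := ∀ (type_model : String) (i : Int), Dom_type_and_model_splitter type_model i → Pre_type_and_model_splitter type_model i → Spec_type_and_model_splitter type_model i (type_and_model_splitter type_model i)


-- ===== LEMMAS AND PROOFS =====

-- the loop invariant: for an in-range index, A's recursion returns the two slices at B's loop index
set_option maxRecDepth 4096 in
lemma pvTms_agree (tm : String) :
    ∀ (m : Nat) (i : Int), (((tm.toList.length : Int) - i).toNat = m) →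
      PySem.Raise.InRange tm.toList.length i →
      type_and_model_splitter tm i = type_and_model_splitter_alt tm i := by
  intro m
  induction m using Nat.strong_induction_on with
  | _ m ih =>
    intro i hm hin
    have hin' := hin
    unfold PySem.Raise.InRange at hin'
    obtain ⟨hlo, hhi⟩ := hin'
    obtain ⟨c, hget⟩ : ∃ c, PySem.List.pyGet? tm.toList i = some c := by
      cases hg : PySem.List.pyGet? tm.toList i with
      | none => exact absurd hin ((PySem.List.pyGet?_eq_none_iff _ _).mp hg)
      | some c => exact ⟨c, rfl⟩
    have hJ : pvFindJ tm.toList i =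
        if (c.toNat : Int) ≥ 123 ∨ (c.toNat : Int) = 32 then
          if i + 1 = (tm.toList.length : Int) then i + 1 else pvFindJ tm.toList (i + 1)
        else i := by
      rw [pvFindJ]
      split
      · next hnone => rw [hnone] at hget; exact absurd hget (by simp)
      · next c' hsome => rw [hsome] at hget; injection hget with hc; subst hc; rfl
    rw [type_and_model_splitter]
    rw [pvTmsA]
    split
    · next hnone => rw [hnone] at hget; exact absurd hget (by simp)
    · next c' hsome =>
      rw [hsome] at hget
      injection hget with hc
      subst hc
      by_cases hcond : (c'.toNat : Int) < 123 ∧ (c'.toNat : Int) ≠ 32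
      · rw [if_pos hcond]
        simp only [type_and_model_splitter_alt]
        rw [hJ, if_neg (by omega)]
      · rw [if_neg hcond]
        by_cases hend : i + 1 = (tm.toList.length : Int)
        · rw [if_neg (by omega)]
          simp only [type_and_model_splitter_alt]
          rw [hJ, if_pos (by omega), if_pos hend]
        · rw [if_pos hend]
          have hrec : pvTmsA tm.toList (i + 1) = type_and_model_splitter tm (i + 1) := rfl
          rw [hrec, ih (((tm.toList.length : Int) - (i + 1)).toNat) (by omega) (i + 1) rfl
              (by unfold PySem.Raise.InRange; omega)]
          simp only [type_and_model_splitter_alt]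
          rw [hJ, if_pos (by omega), if_neg hend]

-- ===== VERDICT (by name: the statement is the Claim_ definition above) =====
theorem type_and_model_splitter_spec : Claim_equal_type_and_model_splitter := by
  intro tm i _ hpre
  unfold Spec_type_and_model_splitter
  exact pvTms_agree tm _ i rfl hpre
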